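-- pv_equiv track=rewrite | github.com/yoonsunny17/TIL | algorithm/IM/케이크자르기/sol1.py | left_right
-- ===== SOURCE A (Python) =====
-- def left_right(N, matrix, total):
--     c = 0
--     left = 0
--
--     # transpose
--     matrix = list(map(list, zip(*matrix)))
--
--     while c < N - 1:
--         left += sum(matrix[c])
--         c += 1
--         # 종료조건1. 성공한 경우
--         if left == total // 2:
--             return 1
--
--         # 종료조건2. 실패한 경우
--         if c == N - 1 and left != total // 2:
--             return 0
-- ===== SOURCE B (Python) =====
-- def left_right(N, matrix, total):
--     # Row-major: fold each row's prefix-sum vector into a running vector of cut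
--     # sums; no transpose, no column sums, no early exit.
--     if N <= 1:
--         return None
--     acc = [0] * (N - 1)
--     for row in matrix:
--         s = 0
--         ps = []
--         for x in row[:N - 1]:
--             s += x
--             ps.append(s)
--         acc = [a + p for a, p in zip(acc, ps)]
--     return 1 if total // 2 in acc else 0
-- ===== Notes on version B (the rewrite author's own statement) =====
-- stated objective: alternative
-- what changed: B replaces A's transpose-then-column-scan with a row-major fold: each row's prefix-sum vector is added elementwise into an accumulator vector of cut sums, answered by one membership test; correctness is the exchange of the two summation orders.
-- outside the precondition, e.g. on left_right(3, [[5], [0]], 10): A returns 1, B returns 1; on left_right(3, [[1, 2], [3]], 100): A raises IndexError, B returns 0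
import Mathlib
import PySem

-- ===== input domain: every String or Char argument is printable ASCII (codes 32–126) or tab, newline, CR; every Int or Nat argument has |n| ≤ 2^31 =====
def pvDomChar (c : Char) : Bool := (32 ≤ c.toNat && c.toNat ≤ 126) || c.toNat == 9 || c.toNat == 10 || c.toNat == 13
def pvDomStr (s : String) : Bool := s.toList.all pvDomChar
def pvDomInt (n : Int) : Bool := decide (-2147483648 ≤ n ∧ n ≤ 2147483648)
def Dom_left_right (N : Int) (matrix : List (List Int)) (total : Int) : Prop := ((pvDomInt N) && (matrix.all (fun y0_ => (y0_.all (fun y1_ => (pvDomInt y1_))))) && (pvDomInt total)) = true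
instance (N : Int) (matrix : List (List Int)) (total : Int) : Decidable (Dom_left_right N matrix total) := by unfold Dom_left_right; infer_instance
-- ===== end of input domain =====

-- B replaces A's transpose-then-column-scan by a row-major fold of per-row prefix-sum vectors plus one membership test (alternative decomposition, same cost).

-- ===== PORT A =====
-- list(map(list, zip(*matrix))): zip truncates to the shortest row, so the
-- transpose has min-row-length rows; getD is exact since c < every row length.
def pyTranspose (m : List (List Int)) : List (List Int) :=
  match m with
  | [] => []
  | r :: rs =>
    let k := (r :: rs).foldl (fun acc row => min acc row.length) r.length
    (List.range k).map (fun c => (r :: rs).map (fun row => row.getD c 0))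

-- the while loop of A; the `none` on an out-of-range column is Python's
-- IndexError, excluded by Pre_left_right.
def leftRightLoopA (t : List (List Int)) (N : Int) (total : Int) (c : Int) (left : Int) : Option Int :=
  if c < N - 1 then
    match PySem.List.pyGet? t c with
    | none => none
    | some col =>
      let left' := left + col.sum
      let c' := c + 1
      if left' = PySem.Int.floordiv total 2 then some 1
      else if c' = N - 1 ∧ left' ≠ PySem.Int.floordiv total 2 then some 0
      else leftRightLoopA t N total c' left'
  else none
termination_by (N - 1 - c).toNat
decreasing_by omega

def left_right (N : Int) (matrix : List (List Int)) (total : Int) : Option Int :=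
  leftRightLoopA (pyTranspose matrix) N total 0 0

-- ===== PORT B =====
-- the inner for-loop of B: prefix sums of a row segment (s += x; ps.append(s))
def prefixSums (xs : List Int) (s : Int) : List Int :=
  match xs with
  | [] => []
  | x :: r => (s + x) :: prefixSums r (s + x)

-- acc = [a + p for a, p in zip(acc, ps)] with ps = prefixSums of row[:N-1]
def rowStep (N : Int) (acc : List Int) (row : List Int) : List Int :=
  (acc.zip (prefixSums (PySem.List.slice row none (some (N - 1))) 0)).map (fun p => p.1 + p.2)

def left_right_alt (N : Int) (matrix : List (List Int)) (total : Int) : Option Int :=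
  if N ≤ 1 then none
  else
    let half := PySem.Int.floordiv total 2
    let acc := matrix.foldl (rowStep N) (List.replicate (N - 1).toNat 0)
    if acc.contains half then some 1 else some 0

-- ===== PRECONDITION & SPEC =====
-- Pre_ excludes N ≥ 2 with an empty matrix or a row shorter than N-1 columns:
-- there A's zip-transpose truncates and the while loop raises IndexError on most
-- such inputs, returning only via an accidental early match before the truncated
-- end (see cites); B's fixed-width accumulator is not that computation.
def Pre_left_right (N : Int) (matrix : List (List Int)) (total : Int) : Prop :=
  N ≤ 1 ∨ (matrix ≠ [] ∧ ∀ row ∈ matrix, N - 1 ≤ (row.length : Int))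
instance (N : Int) (matrix : List (List Int)) (total : Int) : Decidable (Pre_left_right N matrix total) := by unfold Pre_left_right; infer_instance

def pvWitness_left_right : Int × List (List Int) × Int := (2, [[1, 2], [3, 4]], 6)

def Spec_left_right (N : Int) (matrix : List (List Int)) (total : Int) (out : Option Int) : Prop := out = left_right_alt N matrix total
instance (N : Int) (matrix : List (List Int)) (total : Int) (out : Option Int) : Decidable (Spec_left_right N matrix total out) := by unfold Spec_left_right; infer_instance

-- ===== CLAIM (what is proved, stated in full; the proofs are below) =====
def Claim_equal_left_right : Prop := ∀ (N : Int) (matrix : List (List Int)) (total : Int), Dom_left_right N matrix total → Pre_left_right N matrix total → Spec_left_right N matrix total (left_right N matrix total)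

-- ===== LEMMAS AND PROOFS =====

-- proof-side helpers: the column-prefix list both ports compute
def colSum (matrix : List (List Int)) (c : Int) : Int :=
  (matrix.map (fun row => (PySem.List.pyGet? row c).getD 0)).sum

def buildPrefixes (matrix : List (List Int)) (cs : List Int) (acc : Int) : List Int :=
  match cs with
  | [] => []
  | c :: rest => (acc + colSum matrix c) :: buildPrefixes matrix rest (acc + colSum matrix c)

lemma min_foldl_ge (b : Int) (rows : List (List Int)) (init : Nat)
    (hinit : b ≤ (init : Int)) (hrows : ∀ row ∈ rows, b ≤ (row.length : Int)) :
    b ≤ ((rows.foldl (fun acc row => min acc row.length) init : Nat) : Int) := by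
  induction rows generalizing init with
  | nil => simpa using hinit
  | cons r rs ih =>
    simp only [List.foldl_cons]
    exact ih _ (by
      have h1 := hrows r (by simp)
      have : b ≤ ((min init r.length : Nat) : Int) := by
        rcases Nat.le_total init r.length with h | h
        · simpa [Nat.min_eq_left h] using hinit
        · simpa [Nat.min_eq_right h] using h1
      exact this) (fun row hr => hrows row (by simp [hr]))

lemma transpose_get (N : Int) (m : List (List Int)) (hm : m ≠ [])
    (hlen : ∀ row ∈ m, N - 1 ≤ (row.length : Int)) (j : Int) (h0 : 0 ≤ j) (hj : j < N - 1) :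
    PySem.List.pyGet? (pyTranspose m) j =
      some (m.map (fun row => (PySem.List.pyGet? row j).getD 0)) := by
  match m with
  | [] => exact absurd rfl hm
  | r :: rs =>
    have hk : N - 1 ≤ (((r :: rs).foldl (fun acc row => min acc row.length) r.length : Nat) : Int) := by
      apply min_foldl_ge
      · exact hlen r (by simp)
      · exact hlen
    set k := (r :: rs).foldl (fun acc row => min acc row.length) r.length with hkdef
    have hjk : j.toNat < k := by omega
    rw [PySem.List.pyGet?_of_nonneg _ h0]
    unfold pyTranspose
    simp only [← hkdef]
    rw [List.getElem?_map, List.getElem?_range hjk]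
    simp only [Option.map_some]
    congr 1
    apply List.map_congr_left
    intro row hrow
    have hlr : j.toNat < row.length := by
      have := hlen row hrow; omega
    rw [PySem.List.pyGet?_of_nonneg _ h0, List.getElem?_eq_getElem hlr]
    simp [List.getD, List.getElem?_eq_getElem hlr]

lemma loop_eq (matrix t : List (List Int)) (N total : Int)
    (ht : ∀ j : Int, 0 ≤ j → j < N - 1 →
      PySem.List.pyGet? t j = some (matrix.map (fun row => (PySem.List.pyGet? row j).getD 0))) :
    ∀ (k : Nat) (c left : Int), (N - 1 - c).toNat = k → 0 ≤ c → c < N - 1 →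
      leftRightLoopA t N total c left =
        some (if (buildPrefixes matrix (PySem.List.pyRange c (N - 1) 1) left).contains
                  (PySem.Int.floordiv total 2) then 1 else 0) := by
  intro k
  induction k using Nat.strong_induction_on with
  | _ k ih =>
    intro c left hk h0 hc
    rw [leftRightLoopA, if_pos hc, ht c h0 hc]
    rw [PySem.List.pyRange_one_cons hc]
    simp only [buildPrefixes]
    have hcs : (matrix.map (fun row => (PySem.List.pyGet? row c).getD 0)).sum = colSum matrix c := rfl
    rw [hcs]
    set H := PySem.Int.floordiv total 2 with hH
    by_cases heq : left + colSum matrix c = H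
    · rw [if_pos heq]
      simp [heq]
    · rw [if_neg heq]
      have hne : ¬ (H = left + colSum matrix c) := fun h => heq h.symm
      by_cases hlast : c + 1 = N - 1
      · rw [if_pos ⟨hlast, heq⟩]
        have hempty : PySem.List.pyRange (c + 1) (N - 1) 1 = [] := by
          rw [hlast, PySem.List.pyRange_one]
          simp
        rw [hempty]
        simp [buildPrefixes, hne]
      · rw [if_neg (by tauto)]
        rw [ih (N - 1 - (c + 1)).toNat (by omega) (c + 1) (left + colSum matrix c) rfl (by omega) (by omega)]
        simp [hne]

-- ---- B-side characterisation ----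

lemma length_prefixSums (xs : List Int) (s : Int) : (prefixSums xs s).length = xs.length := by
  induction xs generalizing s with
  | nil => rfl
  | cons x r ih => simp [prefixSums, ih]

lemma getElem_prefixSums (xs : List Int) (s : Int) (i : Nat) (hi : i < xs.length) :
    (prefixSums xs s)[i]'(by rw [length_prefixSums]; exact hi) = s + (xs.take (i + 1)).sum := by
  induction xs generalizing s i with
  | nil => simp at hi
  | cons x r ih =>
    cases i with
    | zero => simp [prefixSums]
    | succ j =>
      have hj : j < r.length := by simpa using hi
      simp only [prefixSums, List.getElem_cons_succ, List.take_succ_cons, List.sum_cons]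
      rw [ih (s + x) j hj]
      ring

lemma length_rowStep (N : Int) (acc row : List Int) (k : Nat)
    (hacc : acc.length = k) (hrow : k ≤ (PySem.List.slice row none (some (N - 1))).length) :
    (rowStep N acc row).length = k := by
  simp [rowStep, length_prefixSums, hacc]
  omega

lemma getElem_rowStep (N : Int) (acc row : List Int) (k i : Nat)
    (hacc : acc.length = k) (hrow : k ≤ (PySem.List.slice row none (some (N - 1))).length)
    (hi : i < k) :
    (rowStep N acc row)[i]'(by rw [length_rowStep N acc row k hacc hrow]; exact hi) =
      acc[i]'(by omega) + ((PySem.List.slice row none (some (N - 1))).take (i + 1)).sum := by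
  have hlp : i < (prefixSums (PySem.List.slice row none (some (N - 1))) 0).length := by
    rw [length_prefixSums]; omega
  simp only [rowStep, List.getElem_map, List.getElem_zip]
  rw [getElem_prefixSums _ 0 i (by omega)]
  ring

lemma foldl_rowStep_length (N : Int) (k : Nat) :
    ∀ (rows : List (List Int)),
      (∀ row ∈ rows, k ≤ (PySem.List.slice row none (some (N - 1))).length) →
      ∀ acc : List Int, acc.length = k → (rows.foldl (rowStep N) acc).length = k := by
  intro rows
  induction rows with
  | nil => exact fun _ acc hacc => hacc
  | cons r rs ih =>
    intro hrows acc hacc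
    simp only [List.foldl_cons]
    exact ih (fun row hrow => hrows row (by simp [hrow]))
      (rowStep N acc r) (length_rowStep N acc r k hacc (hrows r (by simp)))

lemma foldl_rowStep_getElem (N : Int) (k : Nat) :
    ∀ (rows : List (List Int))
      (hrows : ∀ row ∈ rows, k ≤ (PySem.List.slice row none (some (N - 1))).length)
      (acc : List Int) (hacc : acc.length = k) (i : Nat) (hi : i < k),
      (rows.foldl (rowStep N) acc)[i]'((foldl_rowStep_length N k rows hrows acc hacc).symm ▸ hi) =
        acc[i]'(hacc.symm ▸ hi) +
          (rows.map (fun row => ((PySem.List.slice row none (some (N - 1))).take (i + 1)).sum)).sum := by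
  intro rows
  induction rows with
  | nil => intro _ acc hacc i hi; simp
  | cons r rs ih =>
    intro hrows acc hacc i hi
    have hr : k ≤ (PySem.List.slice r none (some (N - 1))).length := hrows r (by simp)
    have hstep : (rowStep N acc r).length = k := length_rowStep N acc r k hacc hr
    simp only [List.foldl_cons, List.map_cons, List.sum_cons]
    rw [ih (fun row hrow => hrows row (by simp [hrow])) (rowStep N acc r) hstep i hi,
        getElem_rowStep N acc r k i hacc hr hi]
    ring

lemma length_buildPrefixes (m : List (List Int)) (cs : List Int) (a : Int) :
    (buildPrefixes m cs a).length = cs.length := by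
  induction cs generalizing a with
  | nil => rfl
  | cons c r ih => simp [buildPrefixes, ih]

lemma getElem_buildPrefixes (m : List (List Int)) (cs : List Int) (a : Int) (i : Nat)
    (hi : i < cs.length) :
    (buildPrefixes m cs a)[i]'(by rw [length_buildPrefixes]; exact hi) =
      a + ((cs.take (i + 1)).map (colSum m)).sum := by
  induction cs generalizing a i with
  | nil => simp at hi
  | cons c r ih =>
    cases i with
    | zero => simp [buildPrefixes]
    | succ j =>
      have hj : j < r.length := by simpa using hi
      simp only [buildPrefixes, List.getElem_cons_succ, List.take_succ_cons, List.map_cons,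
        List.sum_cons]
      rw [ih (a + colSum m c) j hj]
      ring

lemma take_sum_eq_range (xs : List Int) (m : Nat) (hm : m ≤ xs.length) :
    (xs.take m).sum = ((List.range m).map (fun j => xs.getD j 0)).sum := by
  induction m with
  | zero => simp
  | succ n ih =>
    rw [List.take_add_one, List.range_succ]
    simp only [List.sum_append, List.map_append, List.map_cons, List.map_nil, List.sum_cons,
      List.sum_nil]
    rw [ih (by omega)]
    have : xs[n]? = some (xs[n]'(by omega)) := List.getElem?_eq_getElem (by omega)
    simp [List.getD, this]

lemma sum_map_swap {α β : Type} (rows : List α) (cs : List β) (f : α → β → Int) :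
    (rows.map (fun r => (cs.map (f r)).sum)).sum =
      (cs.map (fun c => (rows.map (fun r => f r c)).sum)).sum := by
  induction rows with
  | nil => simp
  | cons r rs ih =>
    simp only [List.map_cons, List.sum_cons, ih]
    clear ih
    induction cs with
    | nil => simp
    | cons c cr ihc =>
      simp only [List.map_cons, List.sum_cons] at *
      omega

-- bridge: B's accumulator equals the column-prefix list
lemma acc_eq_buildPrefixes (N : Int) (matrix : List (List Int)) (hN : 1 < N)
    (hlen : ∀ row ∈ matrix, N - 1 ≤ (row.length : Int)) :
    matrix.foldl (rowStep N) (List.replicate (N - 1).toNat 0) =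
      buildPrefixes matrix (PySem.List.pyRange 0 (N - 1) 1) 0 := by
  set k := (N - 1).toNat with hk
  have hslice : ∀ row ∈ matrix, k ≤ (PySem.List.slice row none (some (N - 1))).length := by
    intro row hrow
    rw [PySem.List.slice_to _ (by omega)]
    have := hlen row hrow
    simp [← hk]
    omega
  have hL0 := foldl_rowStep_length N k matrix hslice (List.replicate k 0) (by simp)
  apply List.ext_getElem
  · rw [hL0, length_buildPrefixes, PySem.List.length_pyRange_one]
    omega
  · intro i hi hi2
    have hik : i < k := by rw [hL0] at hi; exact hi
    rw [foldl_rowStep_getElem N k matrix hslice (List.replicate k 0) (by simp) i hik,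
        getElem_buildPrefixes matrix _ 0 i (by rw [PySem.List.length_pyRange_one]; omega)]
    simp only [List.getElem_replicate, zero_add]
    have hrangeN : PySem.List.pyRange 0 (N - 1) 1 = (List.range k).map (fun j : Nat => (0 : Int) + (j : Int)) := by
      have h0 : (N - 1 - 0).toNat = k := by omega
      rw [PySem.List.pyRange_one, h0]
    rw [hrangeN, ← List.map_take, List.take_range]
    have hmin : min (i + 1) k = i + 1 := by omega
    rw [hmin]
    -- left side: per-row truncated prefix sums
    have hL : (matrix.map (fun row =>
        ((PySem.List.slice row none (some (N - 1))).take (i + 1)).sum)).sum =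
        (matrix.map (fun row => ((List.range (i + 1)).map (fun j => row.getD j 0)).sum)).sum := by
      apply congrArg
      apply List.map_congr_left
      intro row hrow
      have hrl : N - 1 ≤ (row.length : Int) := hlen row hrow
      rw [PySem.List.slice_to _ (by omega), List.take_take]
      have : min (i + 1) (N - 1).toNat = i + 1 := by omega
      rw [this, take_sum_eq_range row (i + 1) (by omega)]
    rw [hL, sum_map_swap matrix (List.range (i + 1)) (fun row j => row.getD j 0), List.map_map]
    apply congrArg
    apply List.map_congr_left
    intro j hj
    simp only [Function.comp, colSum, zero_add]
    apply congrArg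
    apply List.map_congr_left
    intro row hrow
    rw [PySem.List.pyGet?_natCast]
    simp [List.getD]

-- ===== VERDICT (by name: the statement is the Claim_ definition above) =====
theorem left_right_spec : Claim_equal_left_right := by
  intro N matrix total _ hpre
  unfold Spec_left_right left_right left_right_alt
  by_cases hN : N ≤ 1
  · rw [leftRightLoopA, if_neg (by omega), if_pos hN]
  · rcases hpre with h | ⟨hne, hlen⟩
    · omega
    · rw [if_neg hN]
      rw [loop_eq matrix (pyTranspose matrix) N total
            (fun j h0 hj => transpose_get N matrix hne hlen j h0 hj)
            (N - 1 - 0).toNat 0 0 rfl le_rfl (by omega)]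
      rw [acc_eq_buildPrefixes N matrix (by omega) hlen]
      dsimp only
      split <;> rfl
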